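-- pv_equiv track=rewrite | github.com/zeronnath/myPython | cote/cote_final_7.py | solution
-- ===== SOURCE A (Python) =====
-- from collections import deque
--
-- def solution(C, B):
--     cony_position = C
--     brown_position = B
--     time = 0
--     visit = [[0] * 2 for _ in range(200001)]
--     q = deque()
--     q.append((brown_position, 0))
--
--     while True:
--         cony_position += time
--         if cony_position > 200000:
--             return -1
--         if visit[cony_position][time % 2]:
--             return time
--
--         for i in range(0, len(q)):
--             current = q.popleft()
--             current_position = current[0]
--             new_time = (current[1] + 1) % 2
--
--             new_position = current_position - 1
--             if new_position >= 0 and not visit[new_position][new_time]: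
--                 visit[new_position][new_time] = True
--                 q.append((new_position, new_time))
--
--             new_position = current_position + 1
--             if new_position < 200001 and not visit[new_position][new_time]:
--                 visit[new_position][new_time] = True
--                 q.append((new_position, new_time))
--
--             new_position = current_position * 2
--             if new_position < 200001 and not visit[new_position][new_time]:
--                 visit[new_position][new_time] = True
--                 q.append((new_position, new_time))
--         time += 1
-- ===== SOURCE B (Python) =====
-- def solution(C, B):
--     # Exact-time occupancy DP: occ is the set of positions Brown can stand on
--     # at exactly time t (no visited marks, no queue, no parities).
--     occ = {B}
--     cony = C
--     t = 0
--     while True: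
--         cony += t
--         if cony > 200000:
--             return -1
--         if cony in occ:
--             return t
--         occ = {q for p in occ for q in (p - 1, p + 1, 2 * p) if 0 <= q <= 200000}
--         t += 1
-- ===== Notes on version B (the rewrite author's own statement) =====
-- stated objective: simpler
-- what changed: A runs a parity-layered BFS with a visited table and an explicit deque interleaved with Cony's steps; B drops the visited/queue/parity machinery entirely and keeps only the set of positions Brown can occupy at exactly time t, recomputing it each step and testing membership of Cony's position.
-- intended difference: On inputs with C == B (0 <= C <= 200000) A returns the first later meeting time (1, or -1 for C = 200000) because its BFS never marks Brown's start, while B returns 0, the intended answer when Cony starts on Brown's position. — e.g. on solution(1, 1): A returns 1, B returns 0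
-- outside the precondition, e.g. on solution(0, -3): A returns 11, B returns -1; on solution(0, 200002): A raises IndexError, B returns -1
import Mathlib
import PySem

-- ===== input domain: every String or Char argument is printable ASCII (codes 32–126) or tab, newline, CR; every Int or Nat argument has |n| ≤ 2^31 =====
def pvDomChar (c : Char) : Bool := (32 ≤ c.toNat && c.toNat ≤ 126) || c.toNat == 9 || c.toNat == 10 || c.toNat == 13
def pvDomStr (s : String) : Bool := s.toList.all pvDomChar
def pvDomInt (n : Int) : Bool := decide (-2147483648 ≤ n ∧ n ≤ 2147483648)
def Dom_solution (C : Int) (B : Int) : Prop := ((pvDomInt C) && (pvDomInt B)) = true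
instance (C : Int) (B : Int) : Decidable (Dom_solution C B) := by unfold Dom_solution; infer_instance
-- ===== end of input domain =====

-- B replaces A's visited-table/deque BFS by an exact-time occupancy-set DP (objective:
-- simpler); on C == B the two differ intentionally (see D_solution below).

-- ===== PORT A =====
-- A's `visit` (a 200001-by-2 list of lists, indices pos in [0,200000], parity in {0,1}) is
-- represented as a flat array of 400002 Bools at index 2*pos+parity (exact on admitted
-- inputs, where every access has pos in [0,200000] and parity in {0,1}).
def vget2 (v : Array Bool) (pos pr : Int) : Bool := v.getD (2*pos + pr).toNat false
def vset2 (v : Array Bool) (pos pr : Int) : Array Bool := v.setIfInBounds (2*pos + pr).toNat true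

-- A's inner `for i in range(0, len(q))` loop: it pops exactly the items present when the
-- loop starts and only appends behind them, so it is a pass over the current queue (the
-- three moves per item in order), the appended items becoming the next queue.  The new
-- queue is accumulated in reverse and reversed at the end (a deque append is O(1)).
def layerA : List (Int × Int) → Array Bool → List (Int × Int) → Array Bool × List (Int × Int)
  | [], visit, qnew => (visit, qnew.reverse)
  | cur :: rest, visit, qnew =>
    let nt := (cur.2 + 1) % 2
    let np1 := cur.1 - 1
    let c1 := decide (0 ≤ np1 ∧ vget2 visit np1 nt = false)
    let qnew := if c1 then (np1, nt) :: qnew else qnew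
    let visit := if c1 then vset2 visit np1 nt else visit
    let np2 := cur.1 + 1
    let c2 := decide (np2 < 200001 ∧ vget2 visit np2 nt = false)
    let qnew := if c2 then (np2, nt) :: qnew else qnew
    let visit := if c2 then vset2 visit np2 nt else visit
    let np3 := cur.1 * 2
    let c3 := decide (np3 < 200001 ∧ vget2 visit np3 nt = false)
    let qnew := if c3 then (np3, nt) :: qnew else qnew
    let visit := if c3 then vset2 visit np3 nt else visit
    layerA rest visit qnew

-- A's `while True` loop; the fuel only makes the recursion total (on admitted inputs the
-- loop returns within 634 iterations, so fuel 1000 is never exhausted).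
def aloop : Nat → Array Bool → List (Int × Int) → Int → Int → Int
  | 0, _, _, _, _ => -2
  | n+1, visit, q, cony, time =>
    let cony := cony + time
    if cony > 200000 then -1
    else if vget2 visit cony (time % 2) = true then time
    else
      let st := layerA q visit []
      aloop n st.1 st.2 cony (time + 1)

def solution (C : Int) (B : Int) : Int :=
  aloop 1000 (Array.replicate 400002 false) [(B, 0)] C 0

-- ===== PORT B =====
-- Source B's occupancy set is represented as a Std.HashSet Int (exact for a Python set of
-- ints consumed only through membership, as here; a list-backed set cannot be evaluated
-- on the admitted inputs).  The comprehension
-- {q for p in occ for q in (p-1, p+1, 2*p) if 0 <= q <= 200000} is the fold below.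
def stepOcc (occ : Std.HashSet Int) : Std.HashSet Int :=
  occ.fold (fun acc p =>
    [p - 1, p + 1, 2 * p].foldl (fun acc q =>
      if 0 ≤ q ∧ q ≤ 200000 then acc.insert q else acc) acc)
    ∅

-- Source B's `while True` loop (fuel only for totality; never exhausted on admitted inputs).
def bloop : Nat → Std.HashSet Int → Int → Int → Int
  | 0, _, _, _ => -2
  | n+1, occ, cony, t =>
    let cony := cony + t
    if cony > 200000 then -1
    else if occ.contains cony then t
    else bloop n (stepOcc occ) cony (t + 1)

def solution_alt (C : Int) (B : Int) : Int :=
  bloop 1000 ((∅ : Std.HashSet Int).insert B) C 0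

-- ===== PRECONDITION & SPEC =====
-- Pre_ excludes inputs where A indexes `visit` outside [0,200000]: with C ≤ 200000, a
-- negative C or B makes A read/mark cells through Python's accidental negative-index
-- wraparound (IndexError once below -200001), and B ≥ 200002 makes A raise IndexError
-- probing visit[B-1]; for C > 200000 A returns -1 before touching anything, so any B is admitted.
def Pre_solution (C : Int) (B : Int) : Prop :=
  200000 < C ∨ (0 ≤ C ∧ C ≤ 200000 ∧ 0 ≤ B ∧ B ≤ 200001)
instance (C : Int) (B : Int) : Decidable (Pre_solution C B) := by unfold Pre_solution; infer_instance

def pvWitness_solution : Int × Int := (3, 2)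

-- On inputs with C == B (0 ≤ C ≤ 200000) A returns the first later meeting time (1, or -1
-- for C = 200000) because its BFS never marks Brown's start position, while B returns 0,
-- the intended answer when Cony already starts on Brown's position.
def D_solution (C : Int) (B : Int) : Prop := C = B ∧ C ≤ 200000
instance (C : Int) (B : Int) : Decidable (D_solution C B) := by unfold D_solution; infer_instance

def Spec_solution (C : Int) (B : Int) (out : Int) : Prop := ¬ D_solution C B → out = solution_alt C B
instance (C : Int) (B : Int) (out : Int) : Decidable (Spec_solution C B out) := by unfold Spec_solution; infer_instance

def pvDiffWitness_solution : Int × Int := (1, 1)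
def pvDiffWitnessOut_solution : Int × Int := (1, 0)

-- ===== CLAIM (what is proved, stated in full; the proofs are below) =====
def Claim_unchanged_solution : Prop := ∀ (C : Int) (B : Int), Dom_solution C B → Pre_solution C B → Spec_solution C B (solution C B)
def Claim_changed_solution : Prop := Dom_solution (pvDiffWitness_solution.1) (pvDiffWitness_solution.2) ∧ Pre_solution (pvDiffWitness_solution.1) (pvDiffWitness_solution.2) ∧ D_solution (pvDiffWitness_solution.1) (pvDiffWitness_solution.2) ∧ solution (pvDiffWitness_solution.1) (pvDiffWitness_solution.2) = pvDiffWitnessOut_solution.1 ∧ solution_alt (pvDiffWitness_solution.1) (pvDiffWitness_solution.2) = pvDiffWitnessOut_solution.2 ∧ pvDiffWitnessOut_solution.1 ≠ pvDiffWitnessOut_solution.2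
def Claim_exact_solution : Prop := ∀ (C : Int) (B : Int), Dom_solution C B → Pre_solution C B → D_solution C B → solution C B ≠ solution_alt C B

-- ===== LEMMAS AND PROOFS =====

-- proof-side pair-state formulation of A's layer body (bridged to the port below)
def stepA (st : Array Bool × List (Int × Int)) (cur : Int × Int) : Array Bool × List (Int × Int) :=
  let nt := (cur.2 + 1) % 2
  let st1 := let np := cur.1 - 1
    if 0 ≤ np ∧ vget2 st.1 np nt = false then (vset2 st.1 np nt, st.2 ++ [(np, nt)]) else st
  let st2 := let np := cur.1 + 1
    if np < 200001 ∧ vget2 st1.1 np nt = false then (vset2 st1.1 np nt, st1.2 ++ [(np, nt)]) else st1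
  let np := cur.1 * 2
  if np < 200001 ∧ vget2 st2.1 np nt = false then (vset2 st2.1 np nt, st2.2 ++ [(np, nt)]) else st2

theorem layerA_eq (q : List (Int × Int)) : ∀ (visit : Array Bool) (qnew : List (Int × Int)),
    layerA q visit qnew = ((q.foldl stepA (visit, qnew.reverse)).1,
                           (q.foldl stepA (visit, qnew.reverse)).2) := by
  induction q with
  | nil => intro visit qnew; simp [layerA]
  | cons cur q ih =>
    intro visit qnew
    simp only [layerA, List.foldl_cons, stepA, decide_eq_true_eq]
    split_ifs <;> simp [ih]

theorem layerA_nil_acc (q : List (Int × Int)) (visit : Array Bool) :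
    layerA q visit [] = q.foldl stepA (visit, []) := by
  rw [layerA_eq]; rfl

-- generic getD/setIfInBounds interaction
theorem getD_setIfInBounds_eq {α : Type} (a : Array α) (i j : Nat) (x d : α) (hi : i < a.size) :
    (a.setIfInBounds i x).getD j d = if i = j then x else a.getD j d := by
  simp only [Array.getD_eq_getD_getElem?, Array.getElem?_setIfInBounds]
  by_cases h : i = j
  · subst h; simp [hi]
  · simp [h]

theorem vget2_replicate (pos pr : Int) : vget2 (Array.replicate 400002 false) pos pr = false := by
  simp [vget2, Array.getD_eq_getD_getElem?, Array.getElem?_replicate]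
  split <;> simp

theorem vget2_vset2 (v : Array Bool) (hs : v.size = 400002) (pos pr pos' pr' : Int)
    (h1 : 0 ≤ pos) (h2 : pos ≤ 200000) (h3 : pr = 0 ∨ pr = 1)
    (h1' : 0 ≤ pos') (h2' : pos' ≤ 200000) (h3' : pr' = 0 ∨ pr' = 1) :
    vget2 (vset2 v pos pr) pos' pr' = if pos = pos' ∧ pr = pr' then true else vget2 v pos' pr' := by
  unfold vget2 vset2
  rw [getD_setIfInBounds_eq _ _ _ _ _ (by rw [hs]; omega)]
  by_cases h : pos = pos' ∧ pr = pr'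
  · rw [if_pos (by omega), if_pos h]
  · rw [if_neg (by omega), if_neg h]

theorem size_vset2 (v : Array Bool) (pos pr : Int) : (vset2 v pos pr).size = v.size :=
  Array.size_setIfInBounds

theorem aloop_succ (n : Nat) (visit : Array Bool) (q : List (Int × Int)) (cony time : Int) :
    aloop (n+1) visit q cony time =
      (if cony + time > 200000 then -1
       else if vget2 visit (cony + time) (time % 2) = true then time
       else aloop n (layerA q visit []).1 (layerA q visit []).2 (cony + time) (time + 1)) := rfl

theorem bloop_succ (n : Nat) (occ : Std.HashSet Int) (cony t : Int) :
    bloop (n+1) occ cony t =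
      (if cony + t > 200000 then -1
       else if occ.contains (cony + t) = true then t
       else bloop n (stepOcc occ) (cony + t) (t + 1)) := rfl

-- neighbour relation of Brown's three moves
def nbr (y x : Int) : Prop := x = y - 1 ∨ x = y + 1 ∨ x = 2 * y

-- occupancy semantics: OccP B t x = Brown can stand on x at exactly time t
def OccP (B : Int) : Nat → Int → Prop
  | 0 => fun x => x = B
  | t+1 => fun x => ∃ p, OccP B t p ∧ nbr p x ∧ 0 ≤ x ∧ x ≤ 200000

theorem occ_range (B : Int) (d : Nat) (x : Int) (hd : 1 ≤ d) (h : OccP B d x) :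
    0 ≤ x ∧ x ≤ 200000 := by
  cases d with
  | zero => omega
  | succ t => obtain ⟨p, _, _, h1, h2⟩ := h; exact ⟨h1, h2⟩

theorem occ_plus2 (B : Int) (d : Nat) (x : Int) (hd : 1 ≤ d) (h : OccP B d x) :
    OccP B (d+2) x := by
  obtain ⟨h1, h2⟩ := occ_range B d x hd h
  by_cases hx : 1 ≤ x
  · exact ⟨x - 1, ⟨x, h, Or.inl rfl, by omega, by omega⟩, Or.inr (Or.inl (by omega)), h1, h2⟩
  · exact ⟨x + 1, ⟨x, h, Or.inr (Or.inl rfl), by omega, by omega⟩, Or.inl (by omega), h1, h2⟩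

theorem occ_upto (B : Int) (d : Nat) (x : Int) (hd : 1 ≤ d) (h : OccP B d x) :
    ∀ k : Nat, OccP B (d + 2*k) x := by
  intro k
  induction k with
  | zero => simpa using h
  | succ k ih =>
    have := occ_plus2 B (d + 2*k) x (by omega) ih
    have he : d + 2*(k+1) = (d + 2*k) + 2 := by omega
    rw [he]; exact this

theorem bool_down (b1 b2 : Bool) (h : b1 = true → b2 = true) (h2 : b2 = false) : b1 = false := by
  cases b1 with
  | false => rfl
  | true => rw [h rfl] at h2; exact Bool.noConfusion h2

theorem move_char (S0 : Array Bool × List (Int × Int)) (hV : S0.1.size = 400002)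
    (g : Prop) [Decidable g] (np nt : Int) (hnt : nt = 0 ∨ nt = 1)
    (hg : g ↔ (0 ≤ np ∧ np ≤ 200000)) :
    ((if g ∧ vget2 S0.1 np nt = false then (vset2 S0.1 np nt, S0.2 ++ [(np, nt)]) else S0).1.size = 400002) ∧
    (∀ x p : Int, 0 ≤ x → x ≤ 200000 → (p = 0 ∨ p = 1) →
      (vget2 (if g ∧ vget2 S0.1 np nt = false then (vset2 S0.1 np nt, S0.2 ++ [(np, nt)]) else S0).1 x p = true ↔
        vget2 S0.1 x p = true ∨ (p = nt ∧ x = np ∧ 0 ≤ np ∧ np ≤ 200000))) ∧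
    (∀ e : Int × Int, e ∈ (if g ∧ vget2 S0.1 np nt = false then (vset2 S0.1 np nt, S0.2 ++ [(np, nt)]) else S0).2 ↔
      e ∈ S0.2 ∨ (e = (np, nt) ∧ 0 ≤ np ∧ np ≤ 200000 ∧ vget2 S0.1 np nt = false)) := by
  by_cases hcnd : g ∧ vget2 S0.1 np nt = false
  · obtain ⟨hga, hum⟩ := hcnd
    have hr := hg.mp hga
    rw [if_pos ⟨hga, hum⟩]
    refine ⟨by simp [size_vset2, hV], ?_, ?_⟩
    · intro x p hx1 hx2 hp
      show vget2 (vset2 S0.1 np nt) x p = true ↔ _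
      rw [vget2_vset2 S0.1 hV np nt x p hr.1 hr.2 hnt hx1 hx2 hp]
      by_cases he : np = x ∧ nt = p
      · rw [if_pos he]
        exact ⟨fun _ => Or.inr ⟨he.2.symm, he.1.symm, hr⟩, fun _ => rfl⟩
      · rw [if_neg he]
        constructor
        · exact Or.inl
        · rintro (h | ⟨hp', hx', _⟩)
          · exact h
          · exact absurd ⟨hx'.symm, hp'.symm⟩ he
    · intro e
      show e ∈ S0.2 ++ [(np, nt)] ↔ _
      rw [List.mem_append, List.mem_singleton]
      constructor
      · rintro (h | rfl)
        · exact Or.inl h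
        · exact Or.inr ⟨rfl, hr.1, hr.2, hum⟩
      · rintro (h | ⟨rfl, _⟩)
        · exact Or.inl h
        · exact Or.inr rfl
  · rw [if_neg hcnd]
    refine ⟨hV, ?_, ?_⟩
    · intro x p _ _ _
      constructor
      · exact Or.inl
      · rintro (h | ⟨rfl, rfl, h0, h1⟩)
        · exact h
        · cases hb : vget2 S0.1 x p with
          | true => rfl
          | false => exact absurd ⟨hg.mpr ⟨h0, h1⟩, hb⟩ hcnd
    · intro e
      constructor
      · exact Or.inl
      · rintro (h | ⟨rfl, h0, h1, hum⟩)
        · exact h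
        · exact absurd ⟨hg.mpr ⟨h0, h1⟩, hum⟩ hcnd

theorem stepA_char (S0 : Array Bool × List (Int × Int)) (hV : S0.1.size = 400002)
    (y c : Int) (hy1 : 0 ≤ y) (hy2 : y ≤ 200001) (_hc : c = 0 ∨ c = 1) :
    ((stepA S0 (y, c)).1.size = 400002) ∧
    (∀ x p : Int, 0 ≤ x → x ≤ 200000 → (p = 0 ∨ p = 1) →
      (vget2 (stepA S0 (y, c)).1 x p = true ↔
        vget2 S0.1 x p = true ∨ (p = (c + 1) % 2 ∧ nbr y x ∧ 0 ≤ x ∧ x ≤ 200000))) ∧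
    (∀ e : Int × Int, e ∈ (stepA S0 (y, c)).2 ↔
      e ∈ S0.2 ∨ (e.2 = (c + 1) % 2 ∧ nbr y e.1 ∧ 0 ≤ e.1 ∧ e.1 ≤ 200000 ∧ vget2 S0.1 e.1 e.2 = false)) := by
  have hnt : (c + 1) % 2 = 0 ∨ (c + 1) % 2 = 1 := by omega
  have M1 := move_char S0 hV (0 ≤ y - 1) (y - 1) ((c + 1) % 2) hnt (by omega)
  set S1 := (if 0 ≤ y - 1 ∧ vget2 S0.1 (y - 1) ((c + 1) % 2) = false
    then (vset2 S0.1 (y - 1) ((c + 1) % 2), S0.2 ++ [(y - 1, (c + 1) % 2)]) else S0) with hS1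
  have M2 := move_char S1 M1.1 (y + 1 < 200001) (y + 1) ((c + 1) % 2) hnt (by omega)
  set S2 := (if y + 1 < 200001 ∧ vget2 S1.1 (y + 1) ((c + 1) % 2) = false
    then (vset2 S1.1 (y + 1) ((c + 1) % 2), S1.2 ++ [(y + 1, (c + 1) % 2)]) else S1) with hS2
  have M3 := move_char S2 M2.1 (y * 2 < 200001) (y * 2) ((c + 1) % 2) hnt (by omega)
  set S3 := (if y * 2 < 200001 ∧ vget2 S2.1 (y * 2) ((c + 1) % 2) = false
    then (vset2 S2.1 (y * 2) ((c + 1) % 2), S2.2 ++ [(y * 2, (c + 1) % 2)]) else S2) with hS3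
  have hstep : stepA S0 (y, c) = S3 := rfl
  refine ⟨by rw [hstep]; exact M3.1, ?_, ?_⟩
  · intro x p hx1 hx2 hp
    rw [hstep, M3.2.1 x p hx1 hx2 hp, M2.2.1 x p hx1 hx2 hp, M1.2.1 x p hx1 hx2 hp]
    constructor
    · rintro (((h | ⟨hp', hx', h3, h4⟩) | ⟨hp', hx', h3, h4⟩) | ⟨hp', hx', h3, h4⟩)
      · exact Or.inl h
      · exact Or.inr ⟨hp', Or.inl hx', hx1, hx2⟩
      · exact Or.inr ⟨hp', Or.inr (Or.inl hx'), hx1, hx2⟩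
      · exact Or.inr ⟨hp', Or.inr (Or.inr (by omega)), hx1, hx2⟩
    · rintro (h | ⟨hp', hn, _, _⟩)
      · exact Or.inl (Or.inl (Or.inl h))
      · have hn' : x = y - 1 ∨ x = y + 1 ∨ x = 2 * y := hn
        rcases hn' with h1 | h2 | h3
        · exact Or.inl (Or.inl (Or.inr ⟨hp', h1, by omega, by omega⟩))
        · exact Or.inl (Or.inr ⟨hp', h2, by omega, by omega⟩)
        · exact Or.inr ⟨hp', by omega, by omega, by omega⟩
  · rintro ⟨e1, e2⟩
    rw [hstep, M3.2.2 (e1, e2), M2.2.2 (e1, e2), M1.2.2 (e1, e2)]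
    constructor
    · rintro (((h | ⟨he, h0, h1, hum⟩) | ⟨he, h0, h1, hum⟩) | ⟨he, h0, h1, hum⟩)
      · exact Or.inl h
      · injection he with hA hB
        subst hA; subst hB
        exact Or.inr ⟨rfl, Or.inl rfl, h0, h1, hum⟩
      · injection he with hA hB
        subst hA; subst hB
        have h' : vget2 S0.1 (y + 1) ((c + 1) % 2) = false :=
          bool_down _ _ (fun hb => (M1.2.1 (y + 1) ((c + 1) % 2) h0 h1 hnt).mpr (Or.inl hb)) hum
        exact Or.inr ⟨rfl, Or.inr (Or.inl rfl), h0, h1, h'⟩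
      · injection he with hA hB
        subst hA; subst hB
        have h'' : vget2 S1.1 (y * 2) ((c + 1) % 2) = false :=
          bool_down _ _ (fun hb => (M2.2.1 (y * 2) ((c + 1) % 2) h0 h1 hnt).mpr (Or.inl hb)) hum
        have h' : vget2 S0.1 (y * 2) ((c + 1) % 2) = false :=
          bool_down _ _ (fun hb => (M1.2.1 (y * 2) ((c + 1) % 2) h0 h1 hnt).mpr (Or.inl hb)) h''
        exact Or.inr ⟨rfl, Or.inr (Or.inr (by omega)), h0, h1, h'⟩
    · rintro (h | ⟨he2, hn, h0, h1, hum⟩)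
      · exact Or.inl (Or.inl (Or.inl h))
      · have he2' : e2 = (c + 1) % 2 := he2
        subst he2'
        have hn' : e1 = y - 1 ∨ e1 = y + 1 ∨ e1 = 2 * y := hn
        by_cases hA : e1 = y - 1
        · subst hA
          exact Or.inl (Or.inl (Or.inr ⟨rfl, h0, h1, hum⟩))
        · by_cases hBc : e1 = y + 1
          · subst hBc
            have h1' : vget2 S1.1 (y + 1) ((c + 1) % 2) = false := by
              cases hb : vget2 S1.1 (y + 1) ((c + 1) % 2) with
              | false => rfl
              | true =>
                rcases (M1.2.1 (y + 1) ((c + 1) % 2) h0 h1 hnt).mp hb with h | ⟨_, hx', _⟩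
                · rw [hum] at h; exact Bool.noConfusion h
                · omega
            exact Or.inl (Or.inr ⟨rfl, by omega, by omega, h1'⟩)
          · have h3 : e1 = 2 * y := by
              rcases hn' with h | h | h
              exacts [absurd h hA, absurd h hBc, h]
            subst h3
            have h1' : vget2 S1.1 (2 * y) ((c + 1) % 2) = false := by
              cases hb : vget2 S1.1 (2 * y) ((c + 1) % 2) with
              | false => rfl
              | true =>
                rcases (M1.2.1 (2 * y) ((c + 1) % 2) h0 h1 hnt).mp hb with h | ⟨_, hx', _⟩
                · rw [hum] at h; exact Bool.noConfusion h
                · omega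
            have h2' : vget2 S2.1 (2 * y) ((c + 1) % 2) = false := by
              cases hb : vget2 S2.1 (2 * y) ((c + 1) % 2) with
              | false => rfl
              | true =>
                rcases (M2.2.1 (2 * y) ((c + 1) % 2) h0 h1 hnt).mp hb with h | ⟨_, hx', _⟩
                · rw [h1'] at h; exact Bool.noConfusion h
                · exact absurd hx' hBc
            have h0' : (0:Int) ≤ 2 * y := h0
            have h1' : (2 * y : Int) ≤ 200000 := h1
            refine Or.inr ⟨?_, by omega, by omega, ?_⟩
            · show ((2 * y, (c + 1) % 2) : Int × Int) = (y * 2, (c + 1) % 2)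
              rw [Int.mul_comm]
            · show vget2 S2.1 (y * 2) ((c + 1) % 2) = false
              rw [show (y * 2 : Int) = 2 * y from Int.mul_comm y 2]
              exact h2'

theorem foldA_char (c : Int) (hc : c = 0 ∨ c = 1) (Q : List (Int × Int)) :
    ∀ (S0 : Array Bool × List (Int × Int)), S0.1.size = 400002 →
    (∀ e ∈ Q, e.2 = c ∧ 0 ≤ e.1 ∧ e.1 ≤ 200001) →
    ((Q.foldl stepA S0).1.size = 400002) ∧
    (∀ x p : Int, 0 ≤ x → x ≤ 200000 → (p = 0 ∨ p = 1) →
      (vget2 (Q.foldl stepA S0).1 x p = true ↔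
        vget2 S0.1 x p = true ∨ (p = (c + 1) % 2 ∧ ∃ y, (y, c) ∈ Q ∧ nbr y x ∧ 0 ≤ x ∧ x ≤ 200000))) ∧
    (∀ e : Int × Int, e ∈ (Q.foldl stepA S0).2 ↔
      e ∈ S0.2 ∨ (e.2 = (c + 1) % 2 ∧ (∃ y, (y, c) ∈ Q ∧ nbr y e.1 ∧ 0 ≤ e.1 ∧ e.1 ≤ 200000) ∧ vget2 S0.1 e.1 e.2 = false)) := by
  induction Q with
  | nil =>
    intro S0 hs _
    refine ⟨hs, ?_, ?_⟩
    · intro x p _ _ _; simp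
    · intro e; simp
  | cons hd Q ih =>
    obtain ⟨y0, c0⟩ := hd
    intro S0 hs hq
    obtain ⟨hc0, hb1, hb2⟩ := hq (y0, c0) List.mem_cons_self
    subst hc0
    rw [List.foldl_cons]
    have SA := stepA_char S0 hs y0 c0 hb1 hb2 hc
    have IH := ih (stepA S0 (y0, c0)) SA.1 (fun e he => hq e (List.mem_cons_of_mem _ he))
    refine ⟨IH.1, ?_, ?_⟩
    · intro x p h1 h2 h3
      rw [IH.2.1 x p h1 h2 h3, SA.2.1 x p h1 h2 h3]
      constructor
      · rintro ((h | ⟨hp, hn, hr1, hr2⟩) | ⟨hp, y, hyQ, hn, hr1, hr2⟩)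
        · exact Or.inl h
        · exact Or.inr ⟨hp, y0, List.mem_cons_self, hn, hr1, hr2⟩
        · exact Or.inr ⟨hp, y, List.mem_cons_of_mem _ hyQ, hn, hr1, hr2⟩
      · rintro (h | ⟨hp, y, hyQ, hn, hr1, hr2⟩)
        · exact Or.inl (Or.inl h)
        · rcases List.mem_cons.mp hyQ with heq | hyQ'
          · injection heq with hyy _
            exact Or.inl (Or.inr ⟨hp, hyy ▸ hn, hr1, hr2⟩)
          · exact Or.inr ⟨hp, y, hyQ', hn, hr1, hr2⟩
    · intro e
      rw [IH.2.2 e, SA.2.2 e]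
      constructor
      · rintro ((h | ⟨he2, hn, h0, h1, hum⟩) | ⟨he2, ⟨y, hyQ, hn, h0, h1⟩, hum⟩)
        · exact Or.inl h
        · exact Or.inr ⟨he2, ⟨y0, List.mem_cons_self, hn, h0, h1⟩, hum⟩
        · have hpe : e.2 = 0 ∨ e.2 = 1 := by omega
          have hS0 : vget2 S0.1 e.1 e.2 = false :=
            bool_down _ _ (fun hb => (SA.2.1 e.1 e.2 h0 h1 hpe).mpr (Or.inl hb)) hum
          exact Or.inr ⟨he2, ⟨y, List.mem_cons_of_mem _ hyQ, hn, h0, h1⟩, hS0⟩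
      · rintro (h | ⟨he2, ⟨y, hyQ, hn, h0, h1⟩, hum⟩)
        · exact Or.inl (Or.inl h)
        · have hpe : e.2 = 0 ∨ e.2 = 1 := by omega
          rcases List.mem_cons.mp hyQ with heq | hyQ'
          · injection heq with hyy _
            exact Or.inl (Or.inr ⟨he2, hyy ▸ hn, h0, h1, hum⟩)
          · by_cases hnb : nbr y0 e.1
            · exact Or.inl (Or.inr ⟨he2, hnb, h0, h1, hum⟩)
            · have hS1 : vget2 (stepA S0 (y0, c0)).1 e.1 e.2 = false := by
                cases hb : vget2 (stepA S0 (y0, c0)).1 e.1 e.2 with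
                | false => rfl
                | true =>
                  rcases (SA.2.1 e.1 e.2 h0 h1 hpe).mp hb with h | ⟨_, hn0, _⟩
                  · rw [hum] at h; exact Bool.noConfusion h
                  · exact absurd hn0 hnb
              exact Or.inr ⟨he2, ⟨y, hyQ', hn, h0, h1⟩, hS1⟩

-- the A-side BFS state sequence: (visit, queue) after t layers
def seqA (B : Int) : Nat → Array Bool × List (Int × Int)
  | 0 => (Array.replicate 400002 false, [(B, 0)])
  | t+1 => (seqA B t).2.foldl stepA ((seqA B t).1, [])

-- the global A-side invariant: visit marks = occupancies of matching parity, queue = fresh marks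
theorem phi (B : Int) (hB1 : 0 ≤ B) (hB2 : B ≤ 200001) : ∀ t : Nat,
    ((seqA B t).1.size = 400002) ∧
    (∀ e ∈ (seqA B t).2, e.2 = (t : Int) % 2 ∧ 0 ≤ e.1 ∧ e.1 ≤ 200001) ∧
    (∀ x p : Int, 0 ≤ x → x ≤ 200000 → (p = 0 ∨ p = 1) →
      (vget2 (seqA B t).1 x p = true ↔ ∃ d : Nat, 1 ≤ d ∧ d ≤ t ∧ (d : Int) % 2 = p ∧ OccP B d x)) ∧
    (∀ x : Int, ((x, (t : Int) % 2) ∈ (seqA B t).2 ↔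
      (t = 0 ∧ x = B) ∨ (1 ≤ t ∧ OccP B t x ∧ ¬ ∃ d : Nat, 1 ≤ d ∧ d < t ∧ (d : Int) % 2 = (t : Int) % 2 ∧ OccP B d x))) := by
  intro t
  induction t with
  | zero =>
    refine ⟨by simp [seqA], ?_, ?_, ?_⟩
    · intro e he
      simp only [seqA, List.mem_singleton] at he
      subst he
      exact ⟨by simp, hB1, hB2⟩
    · intro x p _ _ _
      constructor
      · intro h
        rw [show (seqA B 0).1 = Array.replicate 400002 false from rfl, vget2_replicate] at h
        exact Bool.noConfusion h
      · rintro ⟨d, h1, h2, _, _⟩; omega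
    · intro x
      constructor
      · intro h
        simp only [seqA, List.mem_singleton] at h
        injection h with h1 _
        exact Or.inl ⟨rfl, h1⟩
      · rintro (⟨_, rfl⟩ | ⟨h1, _, _⟩)
        · simp [seqA]
        · omega
  | succ t ih =>
    obtain ⟨hsz, hqi, hma, hqc⟩ := ih
    have hc : (t : Int) % 2 = 0 ∨ (t : Int) % 2 = 1 := by omega
    have hcast : ((t+1 : Nat) : Int) % 2 = ((t : Int) % 2 + 1) % 2 := by push_cast; omega
    have F := foldA_char ((t : Int) % 2) hc (seqA B t).2 ((seqA B t).1, []) hsz hqi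
    have hseq : seqA B (t+1) = (seqA B t).2.foldl stepA ((seqA B t).1, []) := rfl
    have hOy : ∀ y : Int, (y, (t : Int) % 2) ∈ (seqA B t).2 → OccP B t y := by
      intro y hy
      rcases (hqc y).mp hy with ⟨ht0, rfl⟩ | ⟨_, h, _⟩
      · subst ht0; exact rfl
      · exact h
    refine ⟨by rw [hseq]; exact F.1, ?_, ?_, ?_⟩
    · intro e he
      rw [hseq] at he
      rcases (F.2.2 e).mp he with h | ⟨he2, ⟨y, _, _, h0, h1⟩, _⟩
      · simp at h
      · exact ⟨by rw [hcast]; exact he2, h0, by omega⟩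
    · intro x p h1 h2 h3
      rw [hseq, F.2.1 x p h1 h2 h3]
      constructor
      · rintro (h | ⟨hp, y, hyQ, hn, hr1, hr2⟩)
        · obtain ⟨d, hd1, hd2, hd3, hd4⟩ := (hma x p h1 h2 h3).mp h
          exact ⟨d, hd1, by omega, hd3, hd4⟩
        · exact ⟨t+1, by omega, le_refl _, by rw [hcast]; omega, ⟨y, hOy y hyQ, hn, hr1, hr2⟩⟩
      · rintro ⟨d, hd1, hd2, hd3, hd4⟩
        by_cases hdt : d ≤ t
        · exact Or.inl ((hma x p h1 h2 h3).mpr ⟨d, hd1, hdt, hd3, hd4⟩)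
        · have hdd : d = t + 1 := by omega
          subst hdd
          obtain ⟨y, hOyt, hn, h0x, h1x⟩ := hd4
          by_cases hyQ : (y, (t : Int) % 2) ∈ (seqA B t).2
          · exact Or.inr ⟨by rw [hcast] at hd3; omega, y, hyQ, hn, h0x, h1x⟩
          · have hnRHS : ¬ ((t = 0 ∧ y = B) ∨ (1 ≤ t ∧ OccP B t y ∧ ¬ ∃ d : Nat, 1 ≤ d ∧ d < t ∧ (d : Int) % 2 = (t : Int) % 2 ∧ OccP B d y)) :=
              fun hh => hyQ ((hqc y).mpr hh)
            rcases Nat.eq_zero_or_pos t with ht0 | ht1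
            · exfalso; subst ht0; exact hnRHS (Or.inl ⟨rfl, hOyt⟩)
            · have hE : ∃ d : Nat, 1 ≤ d ∧ d < t ∧ (d : Int) % 2 = (t : Int) % 2 ∧ OccP B d y := by
                by_contra hnE
                exact hnRHS (Or.inr ⟨ht1, hOyt, hnE⟩)
              obtain ⟨d', hd'1, hd'2, hd'3, hd'4⟩ := hE
              refine Or.inl ((hma x p h1 h2 h3).mpr ⟨d'+1, by omega, by omega, ?_, ⟨y, hd'4, hn, h0x, h1x⟩⟩)
              rw [hcast] at hd3
              push_cast
              push_cast at hd'3
              omega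
    · intro x
      rw [hseq, F.2.2 (x, ((t+1 : Nat) : Int) % 2)]
      constructor
      · rintro (h | ⟨he2, ⟨y, hyQ, hn, h0, h1⟩, hum⟩)
        · simp at h
        · refine Or.inr ⟨by omega, ⟨y, hOy y hyQ, hn, h0, h1⟩, ?_⟩
          rintro ⟨d, hdl1, hdl2, hdl3, hdl4⟩
          have hum' : vget2 (seqA B t).1 x (((t+1 : Nat) : Int) % 2) = false := hum
          have htr : vget2 (seqA B t).1 x (((t+1 : Nat) : Int) % 2) = true :=
            (hma x (((t+1 : Nat) : Int) % 2) h0 h1 (by omega)).mpr ⟨d, hdl1, by omega, hdl3, hdl4⟩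
          rw [htr] at hum'
          exact Bool.noConfusion hum'
      · rintro (⟨h0, _⟩ | ⟨_, hOx, hnE⟩)
        · omega
        · obtain ⟨y, hOyt, hn, h0x, h1x⟩ := hOx
          have hum' : vget2 (seqA B t).1 x (((t+1 : Nat) : Int) % 2) = false := by
            cases hb : vget2 (seqA B t).1 x (((t+1 : Nat) : Int) % 2) with
            | false => rfl
            | true =>
              obtain ⟨d, hd1, hd2, hd3, hd4⟩ := (hma x _ h0x h1x (by omega)).mp hb
              exact absurd ⟨d, hd1, by omega, hd3, hd4⟩ hnE
          by_cases hyQ : (y, (t : Int) % 2) ∈ (seqA B t).2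
          · refine Or.inr ⟨?_, ⟨y, hyQ, hn, h0x, h1x⟩, hum'⟩
            show ((t+1 : Nat) : Int) % 2 = ((t : Int) % 2 + 1) % 2
            omega
          · exfalso
            have hnRHS : ¬ ((t = 0 ∧ y = B) ∨ (1 ≤ t ∧ OccP B t y ∧ ¬ ∃ d : Nat, 1 ≤ d ∧ d < t ∧ (d : Int) % 2 = (t : Int) % 2 ∧ OccP B d y)) :=
              fun hh => hyQ ((hqc y).mpr hh)
            rcases Nat.eq_zero_or_pos t with ht0 | ht1
            · subst ht0; exact hnRHS (Or.inl ⟨rfl, hOyt⟩)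
            · have hE : ∃ d : Nat, 1 ≤ d ∧ d < t ∧ (d : Int) % 2 = (t : Int) % 2 ∧ OccP B d y := by
                by_contra hnE2
                exact hnRHS (Or.inr ⟨ht1, hOyt, hnE2⟩)
              obtain ⟨d', h1', h2', h3', h4'⟩ := hE
              refine hnE ⟨d'+1, by omega, by omega, ?_, ⟨y, h4', hn, h0x, h1x⟩⟩
              push_cast
              push_cast at h3'
              omega

theorem markedA_iff (B : Int) (hB1 : 0 ≤ B) (hB2 : B ≤ 200001) (t : Nat) (x : Int)
    (hx1 : 0 ≤ x) (hx2 : x ≤ 200000) :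
    (vget2 (seqA B t).1 x ((t : Int) % 2) = true ↔ (1 ≤ t ∧ OccP B t x)) := by
  rw [(phi B hB1 hB2 t).2.2.1 x ((t : Int) % 2) hx1 hx2 (by omega)]
  constructor
  · rintro ⟨d, h1, h2, hpar, ho⟩
    obtain ⟨k, hk⟩ : ∃ k, t = d + 2 * k := ⟨(t - d) / 2, by omega⟩
    exact ⟨by omega, hk ▸ occ_upto B d x h1 ho k⟩
  · rintro ⟨ht, ho⟩
    exact ⟨t, ht, le_refl t, rfl, ho⟩

-- B-side: membership in the fold equals the occupancy step
theorem mem_inner (acc : Std.HashSet Int) (q x : Int) :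
    x ∈ (if 0 ≤ q ∧ q ≤ 200000 then acc.insert q else acc) ↔
      x ∈ acc ∨ (x = q ∧ 0 ≤ q ∧ q ≤ 200000) := by
  by_cases h : 0 ≤ q ∧ q ≤ 200000
  · rw [if_pos h, Std.HashSet.mem_insert, beq_iff_eq]
    constructor
    · rintro (rfl | hx)
      · exact Or.inr ⟨rfl, h⟩
      · exact Or.inl hx
    · rintro (hx | ⟨rfl, _⟩)
      · exact Or.inr hx
      · exact Or.inl rfl
  · rw [if_neg h]
    constructor
    · exact Or.inl
    · rintro (hx | ⟨_, h1, h2⟩)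
      · exact hx
      · exact absurd ⟨h1, h2⟩ h

theorem mem_moves (p : Int) (acc : Std.HashSet Int) (x : Int) :
    x ∈ ([p - 1, p + 1, 2 * p].foldl (fun acc q =>
        if 0 ≤ q ∧ q ≤ 200000 then acc.insert q else acc) acc) ↔
      x ∈ acc ∨ (nbr p x ∧ 0 ≤ x ∧ x ≤ 200000) := by
  simp only [List.foldl_cons, List.foldl_nil]
  rw [mem_inner, mem_inner, mem_inner]
  unfold nbr
  constructor
  · rintro (((h | ⟨rfl, h1, h2⟩) | ⟨rfl, h1, h2⟩) | ⟨rfl, h1, h2⟩)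
    · exact Or.inl h
    · exact Or.inr ⟨Or.inl rfl, h1, h2⟩
    · exact Or.inr ⟨Or.inr (Or.inl rfl), h1, h2⟩
    · exact Or.inr ⟨Or.inr (Or.inr rfl), h1, h2⟩
  · rintro (h | ⟨(rfl | rfl | rfl), h1, h2⟩)
    · exact Or.inl (Or.inl (Or.inl h))
    · exact Or.inl (Or.inl (Or.inr ⟨rfl, h1, h2⟩))
    · exact Or.inl (Or.inr ⟨rfl, h1, h2⟩)
    · exact Or.inr ⟨rfl, h1, h2⟩

theorem mem_stepOcc_fold (s : List Int) : ∀ (acc : Std.HashSet Int) (x : Int),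
    x ∈ (s.foldl (fun acc p =>
        [p - 1, p + 1, 2 * p].foldl (fun acc q =>
          if 0 ≤ q ∧ q ≤ 200000 then acc.insert q else acc) acc) acc) ↔
      x ∈ acc ∨ ∃ p ∈ s, nbr p x ∧ 0 ≤ x ∧ x ≤ 200000 := by
  induction s with
  | nil => intro acc x; simp
  | cons p s ih =>
    intro acc x
    rw [List.foldl_cons, ih, mem_moves]
    constructor
    · rintro ((h | ⟨hn, h1, h2⟩) | ⟨y, hy, hn, h1, h2⟩)
      · exact Or.inl h
      · exact Or.inr ⟨p, List.mem_cons_self, hn, h1, h2⟩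
      · exact Or.inr ⟨y, List.mem_cons_of_mem p hy, hn, h1, h2⟩
    · rintro (h | ⟨y, hy, hn, h1, h2⟩)
      · exact Or.inl (Or.inl h)
      · rcases List.mem_cons.mp hy with rfl | hy
        · exact Or.inl (Or.inr ⟨hn, h1, h2⟩)
        · exact Or.inr ⟨y, hy, hn, h1, h2⟩

theorem mem_stepOcc (occ : Std.HashSet Int) (x : Int) :
    x ∈ stepOcc occ ↔ ∃ p ∈ occ, nbr p x ∧ 0 ≤ x ∧ x ≤ 200000 := by
  unfold stepOcc
  rw [Std.HashSet.fold_eq_foldl_toList, mem_stepOcc_fold]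
  simp only [Std.HashSet.mem_toList]
  simp

-- the B-side occupancy sequence
def seqS (B : Int) : Nat → Std.HashSet Int
  | 0 => (∅ : Std.HashSet Int).insert B
  | t+1 => stepOcc (seqS B t)

theorem mem_seqS (B : Int) : ∀ (t : Nat) (x : Int), x ∈ seqS B t ↔ OccP B t x := by
  intro t
  induction t with
  | zero =>
    intro x
    show x ∈ (∅ : Std.HashSet Int).insert B ↔ x = B
    rw [Std.HashSet.mem_insert, beq_iff_eq]
    constructor
    · rintro (rfl | h)
      · rfl
      · simp at h
    · rintro rfl
      exact Or.inl rfl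
  | succ t ih =>
    intro x
    show x ∈ stepOcc (seqS B t) ↔ _
    rw [mem_stepOcc]
    constructor
    · rintro ⟨p, hp, hn, h1, h2⟩
      exact ⟨p, (ih p).mp hp, hn, h1, h2⟩
    · rintro ⟨p, hp, hn, h1, h2⟩
      exact ⟨p, (ih p).mpr hp, hn, h1, h2⟩

-- the two loops run in lockstep from any time t ≥ 1
theorem loop_sync (B : Int) (hB1 : 0 ≤ B) (hB2 : B ≤ 200001) :
    ∀ (n : Nat) (t : Nat) (cony : Int), 1 ≤ t → 0 ≤ cony →
    aloop n (seqA B t).1 (seqA B t).2 cony (t : Int) = bloop n (seqS B t) cony (t : Int) := by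
  intro n
  induction n with
  | zero => intro t cony _ _; rfl
  | succ n ih =>
    intro t cony ht hcy
    rw [aloop_succ, bloop_succ]
    by_cases hesc : cony + (t : Int) > 200000
    · rw [if_pos hesc, if_pos hesc]
    · rw [if_neg hesc, if_neg hesc]
      have hx1 : (0 : Int) ≤ cony + t := by omega
      have hx2 : cony + (t : Int) ≤ 200000 := by omega
      have hmem : vget2 (seqA B t).1 (cony + t) ((t : Int) % 2) = true ↔
          (seqS B t).contains (cony + t) = true := by
        rw [markedA_iff B hB1 hB2 t (cony + t) hx1 hx2, Std.HashSet.contains_iff_mem, mem_seqS]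
        constructor
        · rintro ⟨_, h⟩; exact h
        · intro h; exact ⟨ht, h⟩
      by_cases hv : vget2 (seqA B t).1 (cony + (t : Int)) ((t : Int) % 2) = true
      · rw [if_pos hv, if_pos (hmem.mp hv)]
      · rw [if_neg hv, if_neg (fun h => hv (hmem.mpr h))]
        have e1 : layerA (seqA B t).2 (seqA B t).1 [] = seqA B (t+1) := by
          rw [layerA_nil_acc]; rfl
        have e2 : stepOcc (seqS B t) = seqS B (t+1) := rfl
        rw [e1, e2, show (t : Int) + 1 = ((t+1 : Nat) : Int) by push_cast; ring]
        exact ih (t+1) (cony + t) (by omega) (by omega)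

theorem aloop_ne_zero : ∀ (n : Nat) (visit : Array Bool) (q : List (Int × Int)) (cony time : Int),
    1 ≤ time → aloop n visit q cony time ≠ 0 := by
  intro n
  induction n with
  | zero => intro _ _ _ _ _; simp [aloop]
  | succ n ih =>
    intro visit q cony time ht
    rw [aloop_succ]
    split_ifs with h1 h2
    · omega
    · omega
    · exact ih _ _ _ _ (by omega)

-- ===== VERDICT (by name: the statements are the Claim_ definitions above) =====
theorem solution_spec : Claim_unchanged_solution := by
  intro C B _ hpre hnd
  show solution C B = solution_alt C B
  unfold solution solution_alt
  rcases hpre with h | ⟨h1, h2, h3, h4⟩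
  · rw [show (1000 : Nat) = 999+1 from rfl, aloop_succ, bloop_succ,
        if_pos (by omega : C + (0 : Int) > 200000), if_pos (by omega : C + (0 : Int) > 200000)]
  · have hCB : C ≠ B := fun he => hnd ⟨he, h2⟩
    rw [show (1000 : Nat) = 999+1 from rfl, aloop_succ, bloop_succ,
        if_neg (by omega : ¬ C + (0 : Int) > 200000), if_neg (by omega : ¬ C + (0 : Int) > 200000)]
    rw [if_neg (by rw [vget2_replicate]; simp)]
    rw [if_neg (show ¬ ((∅ : Std.HashSet Int).insert B).contains (C + 0) = true by
      rw [Std.HashSet.contains_iff_mem]; simp; omega)]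
    have e1 : layerA [(B, 0)] (Array.replicate 400002 false) [] = seqA B 1 := by
      rw [layerA_nil_acc]; rfl
    have e2 : stepOcc ((∅ : Std.HashSet Int).insert B) = seqS B 1 := rfl
    rw [e1, e2, show ((0 : Int) + 1) = ((1 : Nat) : Int) by norm_num]
    exact loop_sync B h3 h4 999 1 (C + 0) (by omega) (by omega)

theorem solution_changed : Claim_changed_solution := by
  unfold Claim_changed_solution
  refine ⟨by decide, by decide, by decide, ?_, ?_, by decide⟩
  case refine_2 =>
    show solution_alt 1 1 = 0
    unfold solution_alt
    rw [show (1000 : Nat) = 999+1 from rfl, bloop_succ, if_neg (by norm_num)]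
    rw [if_pos (show ((∅ : Std.HashSet Int).insert 1).contains (1 + 0) = true by
      rw [Std.HashSet.contains_iff_mem]; simp)]
  show solution 1 1 = 1
  unfold solution
  rw [show (1000 : Nat) = 999+1 from rfl, aloop_succ,
      if_neg (by norm_num), if_neg (by rw [vget2_replicate]; simp)]
  have e1 : layerA [(1, 0)] (Array.replicate 400002 false) [] = seqA 1 1 := by
    rw [layerA_nil_acc]; rfl
  rw [e1, show (999 : Nat) = 998+1 from rfl, aloop_succ, if_neg (by norm_num)]
  have hm : vget2 (seqA 1 1).1 ((1 + 0) + (0 + 1)) ((0 + 1) % 2) = true := by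
    have h2 := (markedA_iff 1 (by norm_num) (by norm_num) 1 2 (by norm_num) (by norm_num)).mpr
      ⟨le_refl 1, ⟨1, rfl, Or.inr (Or.inl rfl), by norm_num, by norm_num⟩⟩
    simpa using h2
  rw [if_pos hm]
  norm_num

theorem solution_tight : Claim_exact_solution := by
  intro C B _ hpre hd
  obtain ⟨rfl, hle⟩ := hd
  have hb : 0 ≤ C := by
    rcases hpre with h | ⟨h1, _⟩
    · omega
    · exact h1
  have halt : solution_alt C C = 0 := by
    unfold solution_alt
    rw [show (1000 : Nat) = 999+1 from rfl, bloop_succ, if_neg (by omega)]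
    rw [if_pos (show ((∅ : Std.HashSet Int).insert C).contains (C + 0) = true by
      rw [Std.HashSet.contains_iff_mem]; simp)]
  have hsol : solution C C ≠ 0 := by
    unfold solution
    rw [show (1000 : Nat) = 999+1 from rfl, aloop_succ,
        if_neg (by omega : ¬ C + (0 : Int) > 200000), if_neg (by rw [vget2_replicate]; simp)]
    exact aloop_ne_zero 999 _ _ _ _ (by omega)
  rw [halt]
  exact hsol
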